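-- pv_equiv track=rewrite | github.com/davidthingsbot/homeo-magic | scraper/process_materia_batch.py | find_matching_symptoms
-- ===== SOURCE A (Python) =====
-- def find_matching_symptoms(remedy_abbrevs, symptoms_db):
--     """Find all symptoms that list any of this remedy's abbreviations."""
--     matching = {}
--     for symptom_path, data in symptoms_db.items():
--         for abbrev in remedy_abbrevs:
--             if abbrev in data.get("remedies", {}):
--                 grade = data["remedies"][abbrev]
--                 matching[symptom_path] = grade
--                 break
--     return matching
-- ===== SOURCE B (Python) =====
-- def find_matching_symptoms(remedy_abbrevs, symptoms_db):
--     """Find all symptoms that list any of this remedy's abbreviations."""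
--     rank = {}
--     for i, abbrev in enumerate(remedy_abbrevs):
--         if abbrev not in rank:
--             rank[abbrev] = i
--     matching = {}
--     for symptom_path, data in symptoms_db.items():
--         best = None
--         for abbrev, grade in data.get("remedies", {}).items():
--             r = rank.get(abbrev)
--             if r is not None and (best is None or r < best[0]):
--                 best = (r, grade)
--         if best is not None:
--             matching[symptom_path] = best[1]
--     return matching
-- ===== Notes on version B (the rewrite author's own statement) =====
-- stated objective: faster
-- what changed: Instead of scanning remedy_abbrevs per symptom until the first hit, B precomputes a rank dict (abbrev -> first index) once and scans each symptom's remedies dict a single time, keeping the entry with minimal rank (strict < preserves A's first-matching-abbrev tie-break).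
import Mathlib
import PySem

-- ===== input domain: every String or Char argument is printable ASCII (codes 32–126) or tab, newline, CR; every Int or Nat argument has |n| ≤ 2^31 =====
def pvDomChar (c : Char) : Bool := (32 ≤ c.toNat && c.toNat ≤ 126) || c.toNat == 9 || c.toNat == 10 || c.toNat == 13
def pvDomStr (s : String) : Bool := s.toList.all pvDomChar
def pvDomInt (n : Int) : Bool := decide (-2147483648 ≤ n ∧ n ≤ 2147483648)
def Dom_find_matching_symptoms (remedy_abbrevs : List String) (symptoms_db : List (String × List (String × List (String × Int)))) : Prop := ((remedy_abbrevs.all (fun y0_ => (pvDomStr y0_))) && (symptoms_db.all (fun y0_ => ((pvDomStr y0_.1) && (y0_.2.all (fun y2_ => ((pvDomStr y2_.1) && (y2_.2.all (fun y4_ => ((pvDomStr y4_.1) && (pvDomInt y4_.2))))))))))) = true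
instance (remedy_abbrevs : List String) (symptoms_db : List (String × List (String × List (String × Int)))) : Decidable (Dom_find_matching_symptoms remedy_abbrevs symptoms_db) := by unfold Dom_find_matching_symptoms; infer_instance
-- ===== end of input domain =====

-- B replaces A's inner scan over remedy_abbrevs by a single scan over each symptom's
-- remedies dict, picking the entry whose abbreviation has minimal precomputed rank
-- (first index in remedy_abbrevs); objective: alternative decomposition.

-- ===== PORT A =====
-- inner loop of A: 'for abbrev in remedy_abbrevs: if abbrev in rem: matching[sp] = rem[abbrev]; break'
def aInner (rem : List (String × Int)) (matching : PySem.Dict String Int) (sp : String) : List String → PySem.Dict String Int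
  | [] => matching
  | ab :: rest =>
    match (PySem.Dict.mk rem).get? ab with
    | some grade => matching.insert sp grade
    | none => aInner rem matching sp rest

def find_matching_symptoms (remedy_abbrevs : List String) (symptoms_db : List (String × List (String × List (String × Int)))) : List (String × Int) :=
  (symptoms_db.foldl
    (fun matching pd => aInner ((PySem.Dict.mk pd.2).getD "remedies" []) matching pd.1 remedy_abbrevs)
    PySem.Dict.empty).items

-- ===== PORT B =====
-- rank = {}; for i, abbrev in enumerate(remedy_abbrevs): if abbrev not in rank: rank[abbrev] = i
def mkRank (remedy_abbrevs : List String) : PySem.Dict String Int :=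
  (PySem.List.enumerate remedy_abbrevs).foldl
    (fun rk p => if rk.contains p.2 then rk else rk.insert p.2 p.1)
    PySem.Dict.empty

-- best = None; for abbrev, grade in rem.items(): r = rank.get(abbrev); if r is not None and (best is None or r < best[0]): best = (r, grade)
def bBest (rank : PySem.Dict String Int) (rem : List (String × Int)) : Option (Int × Int) :=
  rem.foldl
    (fun best p =>
      match rank.get? p.1 with
      | none => best
      | some r =>
        match best with
        | none => some (r, p.2)
        | some b => if r < b.1 then some (r, p.2) else some b)
    none

def find_matching_symptoms_alt (remedy_abbrevs : List String) (symptoms_db : List (String × List (String × List (String × Int)))) : List (String × Int) :=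
  let rank := mkRank remedy_abbrevs
  (symptoms_db.foldl
    (fun matching pd =>
      match bBest rank ((PySem.Dict.mk pd.2).getD "remedies" []) with
      | none => matching
      | some b => matching.insert pd.1 b.2)
    PySem.Dict.empty).items

-- ===== PRECONDITION & SPEC =====
def Spec_find_matching_symptoms (remedy_abbrevs : List String) (symptoms_db : List (String × List (String × List (String × Int)))) (out : List (String × Int)) : Prop := out = find_matching_symptoms_alt remedy_abbrevs symptoms_db
instance (remedy_abbrevs : List String) (symptoms_db : List (String × List (String × List (String × Int)))) (out : List (String × Int)) : Decidable (Spec_find_matching_symptoms remedy_abbrevs symptoms_db out) := by unfold Spec_find_matching_symptoms; infer_instance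

-- ===== CLAIM (what is proved, stated in full; the proofs are below) =====
def Claim_equal_find_matching_symptoms : Prop := ∀ (remedy_abbrevs : List String) (symptoms_db : List (String × List (String × List (String × Int)))), Dom_find_matching_symptoms remedy_abbrevs symptoms_db → Spec_find_matching_symptoms remedy_abbrevs symptoms_db (find_matching_symptoms remedy_abbrevs symptoms_db)

-- ===== LEMMAS AND PROOFS =====

-- grade A's inner loop extracts: the first abbrev present in rem, with its grade
def firstGrade (rem : List (String × Int)) : List String → Option Int
  | [] => none
  | ab :: rest =>
    match (PySem.Dict.mk rem).get? ab with
    | some g => some g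
    | none => firstGrade rem rest

theorem aInner_eq_firstGrade (rem : List (String × Int)) (m : PySem.Dict String Int) (sp : String) (abbrevs : List String) :
    aInner rem m sp abbrevs =
      match firstGrade rem abbrevs with
      | some g => m.insert sp g
      | none => m := by
  induction abbrevs with
  | nil => rfl
  | cons ab rest ih =>
    simp only [aInner, firstGrade]
    cases (PySem.Dict.mk rem).get? ab with
    | some g => rfl
    | none => exact ih

-- B's rank dict as an abstract rank function: first index in the abbrev list
def rf (abbrevs : List String) (ab : String) : Option Int :=
  Option.map Int.ofNat (PySem.List.index? abbrevs ab)

def bStep (rkf : String → Option Int) (best : Option (Int × Int)) (p : String × Int) : Option (Int × Int) :=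
  match rkf p.1 with
  | none => best
  | some r =>
    match best with
    | none => some (r, p.2)
    | some b => if r < b.1 then some (r, p.2) else some b

def bBestF (rkf : String → Option Int) (rem : List (String × Int)) : Option (Int × Int) :=
  rem.foldl (bStep rkf) none

theorem index?_shift (x : String) (l : List String) (ab : String) (s : Int) (hne : x ≠ ab) :
    Option.map (fun n => s + Int.ofNat n) (PySem.List.index? (x :: l) ab)
      = Option.map (fun n => (s + 1) + Int.ofNat n) (PySem.List.index? l ab) := by
  rw [PySem.List.index?_cons_of_ne l hne]
  cases PySem.List.index? l ab with
  | none => rfl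
  | some n =>
    simp only [Option.map_some, Option.some.injEq, Int.ofNat_eq_natCast]
    omega

theorem mkRank_aux (l : List String) (s : Int) (d : PySem.Dict String Int) (ab : String) :
    (((PySem.List.enumerate l s).foldl
        (fun rk p => if rk.contains p.2 then rk else rk.insert p.2 p.1) d).get? ab) =
      (if d.contains ab then d.get? ab else Option.map (fun n => s + Int.ofNat n) (PySem.List.index? l ab)) := by
  induction l generalizing s d with
  | nil =>
    simp only [PySem.List.enumerate_nil, List.foldl_nil, PySem.List.index?_eq_idxOf?,
      List.idxOf?_nil, Option.map_none]
    by_cases h : d.contains ab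
    · simp [h]
    · simp [h, PySem.Dict.get?_eq_none_iff_contains]
  | cons x l ih =>
    rw [PySem.List.enumerate_cons, List.foldl_cons]
    simp only []
    by_cases hx : d.contains x
    · rw [if_pos hx, ih]
      by_cases hab : d.contains ab
      · simp [hab]
      · rw [if_neg hab, if_neg hab]
        have hne : x ≠ ab := by rintro rfl; exact hab hx
        exact (index?_shift x l ab s hne).symm
    · rw [if_neg hx, ih]
      by_cases hab : ab = x
      · subst hab
        rw [if_pos (PySem.Dict.contains_insert_self d ab s), if_neg hx,
          PySem.Dict.get?_insert_self, PySem.List.index?_cons_self]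
        simp
      · have hc : (d.insert x s).contains ab = d.contains ab := by
          rw [PySem.Dict.contains_insert]
          simp [hab]
        rw [hc, PySem.Dict.get?_insert_of_ne d s hab]
        have hne : x ≠ ab := fun h => hab (Eq.symm h)
        by_cases hab2 : d.contains ab
        · simp [hab2]
        · rw [if_neg hab2, if_neg hab2]
          exact (index?_shift x l ab s hne).symm

theorem mkRank_get? (abbrevs : List String) (ab : String) :
    (mkRank abbrevs).get? ab = rf abbrevs ab := by
  rw [mkRank, mkRank_aux abbrevs 0 PySem.Dict.empty ab,
    if_neg (by simp [PySem.Dict.contains_empty]), rf]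
  cases PySem.List.index? abbrevs ab with
  | none => rfl
  | some n => simp

theorem bBest_eq_bBestF (abbrevs : List String) (rem : List (String × Int)) :
    bBest (mkRank abbrevs) rem = bBestF (rf abbrevs) rem := by
  have h : (fun best p => bStep (fun ab => (mkRank abbrevs).get? ab) best p)
      = fun best p => bStep (rf abbrevs) best p := by
    funext best p
    simp only [bStep, mkRank_get?]
  calc bBest (mkRank abbrevs) rem
      = rem.foldl (fun best p => bStep (fun ab => (mkRank abbrevs).get? ab) best p) none := rfl
    _ = rem.foldl (fun best p => bStep (rf abbrevs) best p) none := by rw [h]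
    _ = bBestF (rf abbrevs) rem := rfl

-- the fold does nothing when no key of rem has a rank
theorem bBestF_of_all_none (rkf : String → Option Int) (rem : List (String × Int)) (b : Option (Int × Int))
    (h : ∀ p ∈ rem, rkf p.1 = none) : rem.foldl (bStep rkf) b = b := by
  induction rem generalizing b with
  | nil => rfl
  | cons p rem ih =>
    rw [List.foldl_cons]
    have hb : bStep rkf b p = b := by
      simp [bStep, h p (List.mem_cons_self)]
    rw [hb]
    exact ih _ (fun q hq => h q (List.mem_cons_of_mem _ hq))

-- shifting every rank by a constant does not change which entry wins
theorem bBestF_shift (rkf : String → Option Int) (rem : List (String × Int)) (b : Option (Int × Int)) :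
    rem.foldl (bStep (fun ab => (rkf ab).map (fun r => 1 + r))) (b.map (fun u => (1 + u.1, u.2)))
      = (rem.foldl (bStep rkf) b).map (fun u => (1 + u.1, u.2)) := by
  induction rem generalizing b with
  | nil => rfl
  | cons p rem ih =>
    rw [List.foldl_cons, List.foldl_cons]
    have hstep : bStep (fun ab => (rkf ab).map (fun r => 1 + r)) (b.map (fun u => (1 + u.1, u.2))) p
        = (bStep rkf b p).map (fun u => (1 + u.1, u.2)) := by
      cases hr : rkf p.1 with
      | none => simp [bStep, hr]
      | some r =>
        cases b with
        | none => simp [bStep, hr]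
        | some u =>
          by_cases hlt : r < u.1
          · simp [bStep, hr, hlt, show (1 : Int) + r < 1 + u.1 by omega]
          · simp [bStep, hr, hlt, show ¬ ((1 : Int) + r < 1 + u.1) by omega]
    rw [hstep, ih]

-- pointwise-equal ranks on the keys of rem give the same fold
theorem bBestF_congr (rkf1 rkf2 : String → Option Int) (rem : List (String × Int)) (b : Option (Int × Int))
    (h : ∀ p ∈ rem, rkf1 p.1 = rkf2 p.1) : rem.foldl (bStep rkf1) b = rem.foldl (bStep rkf2) b := by
  induction rem generalizing b with
  | nil => rfl
  | cons p rem ih =>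
    rw [List.foldl_cons, List.foldl_cons]
    have hstep : bStep rkf1 b p = bStep rkf2 b p := by
      simp [bStep, h p (List.mem_cons_self)]
    rw [hstep]
    exact ih _ (fun q hq => h q (List.mem_cons_of_mem _ hq))

-- once the state holds rank 0, nonnegative ranks never replace it
theorem bBestF_keep_zero (rkf : String → Option Int) (rem : List (String × Int)) (g : Int)
    (hnn : ∀ ab r, rkf ab = some r → 0 ≤ r) :
    rem.foldl (bStep rkf) (some (0, g)) = some (0, g) := by
  induction rem with
  | nil => rfl
  | cons p rem ih =>
    rw [List.foldl_cons]
    have hstep : bStep rkf (some (0, g)) p = some (0, g) := by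
      cases hr : rkf p.1 with
      | none => simp [bStep, hr]
      | some r =>
        have := hnn p.1 r hr
        simp [bStep, hr, show ¬ (r < (0 : Int)) by omega]
    rw [hstep]
    exact ih

-- a key absent from a dict literal is the head of no entry
theorem not_key_of_get?_none (rem : List (String × Int)) (a : String)
    (h : (PySem.Dict.mk rem).get? a = none) : ∀ p ∈ rem, p.1 ≠ a := by
  induction rem with
  | nil => intro p hp; cases hp
  | cons q rem ih =>
    intro p hp
    rw [show (PySem.Dict.mk (q :: rem)) = PySem.Dict.mk ((q.1, q.2) :: rem) by rfl,
      PySem.Dict.get?_mk_cons] at h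
    by_cases hq : q.1 = a
    · simp [hq] at h
    · rcases List.mem_cons.mp hp with rfl | hp'
      · exact hq
      · have h' : (PySem.Dict.mk rem).get? a = none := by
          simpa [beq_iff_eq, hq] using h
        exact ih h' p hp'

-- if 'a' has rank 0 and every other ranked key positive rank, a fold over a rem
-- containing 'a' (first grade g) ends at (0, g)
theorem bBestF_hit (rkf : String → Option Int) (a : String)
    (h0 : rkf a = some 0)
    (hpos : ∀ ab r, ab ≠ a → rkf ab = some r → 0 < r)
    (hnn : ∀ ab r, rkf ab = some r → 0 ≤ r) :
    ∀ (rem : List (String × Int)) (g : Int) (b : Option (Int × Int)),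
      (PySem.Dict.mk rem).get? a = some g →
      (b = none ∨ ∃ u, b = some u ∧ 0 < u.1) →
      rem.foldl (bStep rkf) b = some (0, g) := by
  intro rem
  induction rem with
  | nil => intro g b hg _; simp [PySem.Dict.get?] at hg
  | cons p rem ih =>
    intro g b hg hb
    rw [show (PySem.Dict.mk (p :: rem)) = PySem.Dict.mk ((p.1, p.2) :: rem) by rfl,
      PySem.Dict.get?_mk_cons] at hg
    rw [List.foldl_cons]
    by_cases hp : p.1 = a
    · have hg' : p.2 = g := by simpa [hp] using hg
      have hstep : bStep rkf b p = some (0, g) := by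
        rcases hb with rfl | ⟨u, rfl, hu⟩
        · simp [bStep, hp, h0, hg']
        · simp [bStep, hp, h0, hg', hu]
      rw [hstep]
      exact bBestF_keep_zero rkf rem g hnn
    · have hg' : (PySem.Dict.mk rem).get? a = some g := by
        simpa [beq_iff_eq, hp] using hg
      have hb' : bStep rkf b p = none ∨ ∃ u, bStep rkf b p = some u ∧ 0 < u.1 := by
        cases hr : rkf p.1 with
        | none => rcases hb with rfl | ⟨u, rfl, hu⟩
                  · exact Or.inl (by simp [bStep, hr])
                  · exact Or.inr ⟨u, by simp [bStep, hr], hu⟩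
        | some r =>
          have hrpos := hpos p.1 r hp hr
          rcases hb with rfl | ⟨u, rfl, hu⟩
          · exact Or.inr ⟨(r, p.2), by simp [bStep, hr], hrpos⟩
          · by_cases hlt : r < u.1
            · exact Or.inr ⟨(r, p.2), by simp [bStep, hr, hlt], hrpos⟩
            · exact Or.inr ⟨u, by simp [bStep, hr, hlt], hu⟩
      exact ih g _ hg' hb'

theorem rf_cons (a : String) (rest : List String) (ab : String) :
    rf (a :: rest) ab = if ab = a then some 0 else (rf rest ab).map (fun r => 1 + r) := by
  by_cases h : ab = a
  · subst h
    rw [if_pos rfl, rf, PySem.List.index?_cons_self]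
    rfl
  · rw [if_neg h, rf, PySem.List.index?_cons_of_ne rest (Ne.symm h), rf]
    cases PySem.List.index? rest ab with
    | none => rfl
    | some n =>
      simp only [Option.map_some, Option.some.injEq, Int.ofNat_eq_natCast]
      omega

theorem rf_nonneg (abbrevs : List String) (ab : String) (r : Int) (h : rf abbrevs ab = some r) : 0 ≤ r := by
  rw [rf] at h
  cases hi : PySem.List.index? abbrevs ab with
  | none => rw [hi] at h; cases h
  | some n =>
    rw [hi] at h
    simp only [Option.map_some, Option.some.injEq, Int.ofNat_eq_natCast] at h
    omega

-- MAIN per-symptom lemma: B's minimal-rank entry carries exactly the grade of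
-- A's first abbrev present in rem
theorem bBestF_eq_firstGrade (abbrevs : List String) (rem : List (String × Int)) :
    (bBestF (rf abbrevs) rem).map Prod.snd = firstGrade rem abbrevs := by
  induction abbrevs generalizing rem with
  | nil =>
    have h : ∀ p ∈ rem, rf [] p.1 = none := by
      intro p _
      simp [rf, PySem.List.index?_eq_idxOf?]
    rw [bBestF, bBestF_of_all_none _ _ _ h]
    rfl
  | cons a rest ih =>
    rw [firstGrade]
    cases hg : (PySem.Dict.mk rem).get? a with
    | some g =>
      have h0 : rf (a :: rest) a = some 0 := by rw [rf_cons]; simp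
      have hpos : ∀ ab r, ab ≠ a → rf (a :: rest) ab = some r → 0 < r := by
        intro ab r hab h
        rw [rf_cons, if_neg hab] at h
        cases hr : rf rest ab with
        | none => rw [hr] at h; cases h
        | some r' =>
          rw [hr] at h
          simp only [Option.map_some, Option.some.injEq] at h
          have := rf_nonneg rest ab r' hr
          omega
      have hnn : ∀ ab r, rf (a :: rest) ab = some r → 0 ≤ r :=
        fun ab r h => rf_nonneg _ ab r h
      rw [bBestF, bBestF_hit (rf (a :: rest)) a h0 hpos hnn rem g none hg (Or.inl rfl)]
      rfl
    | none =>
      have hkeys := not_key_of_get?_none rem a hg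
      have hcong : ∀ p ∈ rem, rf (a :: rest) p.1 = (fun ab => (rf rest ab).map (fun r => 1 + r)) p.1 := by
        intro p hp
        rw [rf_cons, if_neg (hkeys p hp)]
      rw [bBestF, bBestF_congr (rf (a :: rest)) (fun ab => (rf rest ab).map (fun r => 1 + r)) rem none hcong]
      have hshift := bBestF_shift (rf rest) rem none
      simp only [Option.map_none] at hshift
      rw [hshift, ← ih rem, bBestF]
      cases rem.foldl (bStep (rf rest)) none with
      | none => rfl
      | some u => rfl

-- the two per-symptom step functions agree
theorem step_eq (abbrevs : List String) (m : PySem.Dict String Int)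
    (pd : String × List (String × List (String × Int))) :
    aInner ((PySem.Dict.mk pd.2).getD "remedies" []) m pd.1 abbrevs =
      (match bBest (mkRank abbrevs) ((PySem.Dict.mk pd.2).getD "remedies" []) with
       | none => m
       | some b => m.insert pd.1 b.2) := by
  rw [aInner_eq_firstGrade, ← bBestF_eq_firstGrade abbrevs ((PySem.Dict.mk pd.2).getD "remedies" []),
    bBest_eq_bBestF]
  cases bBestF (rf abbrevs) ((PySem.Dict.mk pd.2).getD "remedies" []) with
  | none => rfl
  | some u => rfl

-- the whole folds over the db agree, from any starting dict
theorem fold_eq (abbrevs : List String) (db : List (String × List (String × List (String × Int))))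
    (m : PySem.Dict String Int) :
    db.foldl (fun matching pd => aInner ((PySem.Dict.mk pd.2).getD "remedies" []) matching pd.1 abbrevs) m
      = db.foldl (fun matching pd =>
          match bBest (mkRank abbrevs) ((PySem.Dict.mk pd.2).getD "remedies" []) with
          | none => matching
          | some b => matching.insert pd.1 b.2) m := by
  induction db generalizing m with
  | nil => rfl
  | cons qd db ih =>
    rw [List.foldl_cons, List.foldl_cons, step_eq abbrevs m qd]
    exact ih _

-- ===== VERDICT (by name: the statement is the Claim_ definition above) =====
theorem find_matching_symptoms_spec : Claim_equal_find_matching_symptoms := by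
  intro remedy_abbrevs symptoms_db _
  show find_matching_symptoms remedy_abbrevs symptoms_db = find_matching_symptoms_alt remedy_abbrevs symptoms_db
  exact congrArg PySem.Dict.items (fold_eq remedy_abbrevs symptoms_db PySem.Dict.empty)
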